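-- pv_equiv track=rewrite | github.com/wildes/suinogestor-android | .agents/skills/material-3-expressive/scripts/update_m3_expressive_refs.py | group_token_names
-- ===== SOURCE A (Python) =====
-- from typing import Dict, Iterable, List, Sequence, Set, Tuple
--
-- def token_group_key(token_name: str) -> str:
--     parts = token_name.split(".")
--     if len(parts) >= 4:
--         return ".".join(parts[:4])
--     return token_name
--
-- def group_token_names(token_names: Sequence[str]) -> Dict[str, List[str]]:
--     grouped: Dict[str, List[str]] = {}
--     for name in token_names:
--         key = token_group_key(name)
--         grouped.setdefault(key, []).append(name)
--     for key in grouped: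
--         grouped[key].sort()
--     return dict(sorted(grouped.items(), key=lambda kv: kv[0]))
-- ===== SOURCE B (Python) =====
-- def token_group_key(token_name: str) -> str:
--     parts = token_name.split(".")
--     if len(parts) >= 4:
--         return ".".join(parts[:4])
--     return token_name
--
-- def group_token_names(token_names):
--     # stable double sort: by name, then by key -> equal-key runs are name-sorted
--     # and keys first appear in key order, so the dict is built already ordered
--     names = sorted(token_names)
--     names.sort(key=token_group_key)
--     result = {}
--     for n in names:
--         result.setdefault(token_group_key(n), []).append(n)
--     return result
-- ===== Notes on version B (the rewrite author's own statement) =====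
-- stated objective: alternative
-- what changed: A groups first, then sorts every group and finally the items; B stable-sorts the list twice (by name, then by key) and groups in a single pass, so the dict is built already in key order with name-sorted groups and needs no per-group sorts and no final sort.
import Mathlib
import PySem

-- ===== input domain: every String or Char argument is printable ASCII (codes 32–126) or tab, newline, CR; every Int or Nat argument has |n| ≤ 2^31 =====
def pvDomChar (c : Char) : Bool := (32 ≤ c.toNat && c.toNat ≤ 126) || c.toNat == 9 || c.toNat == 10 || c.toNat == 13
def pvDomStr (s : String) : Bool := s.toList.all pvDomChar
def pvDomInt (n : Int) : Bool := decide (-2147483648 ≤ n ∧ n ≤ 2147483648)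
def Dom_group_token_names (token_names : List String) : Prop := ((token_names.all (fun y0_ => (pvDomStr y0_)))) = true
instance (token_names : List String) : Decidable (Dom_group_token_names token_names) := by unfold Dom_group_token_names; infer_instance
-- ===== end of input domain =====

-- B stable-sorts twice (by name, then by key) and groups in one pass, so no per-group sorts and no final sort are needed; equal to A on all inputs.

-- ===== PORT A =====
def token_group_key (token_name : String) : String :=
  -- s.split(".") with the nonempty literal separator ".": split? is exact and always `some` here
  let parts := (PySem.Str.split? token_name ".").getD []
  if 4 ≤ parts.length then PySem.Str.join "." (PySem.List.slice parts none (some 4))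
  else token_name

def group_token_names (token_names : List String) : List (String × List String) :=
  -- grouped.setdefault(key, []).append(name)  ≡  grouped[key] = grouped.get(key, []) + [name]
  let grouped := token_names.foldl
    (fun d name => d.modify (token_group_key name) [] (· ++ [name])) PySem.Dict.empty
  -- for key in grouped: grouped[key].sort()  — each value replaced in place by its sorted self
  let grouped2 := PySem.Dict.mk
    (grouped.items.map (fun p => (p.1, PySem.List.sorted p.2 (fun x => x) false)))
  PySem.List.sorted grouped2.items (fun kv => kv.1) false

-- ===== PORT B =====
def group_token_names_alt (token_names : List String) : List (String × List String) :=
  let names := PySem.List.sorted (PySem.List.sorted token_names (fun x => x) false) token_group_key false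
  -- result.setdefault(key, []).append(n)  ≡  result[key] = result.get(key, []) + [n]
  let result := names.foldl (fun d n => d.modify (token_group_key n) [] (· ++ [n])) PySem.Dict.empty
  result.items

-- ===== PRECONDITION & SPEC =====
def Spec_group_token_names (token_names : List String) (out : List (String × List String)) : Prop := out = group_token_names_alt token_names
instance (token_names : List String) (out : List (String × List String)) : Decidable (Spec_group_token_names token_names out) := by unfold Spec_group_token_names; infer_instance

-- ===== CLAIM (what is proved, stated in full; the proofs are below) =====
def Claim_equal_group_token_names : Prop := ∀ (token_names : List String), Dom_group_token_names token_names → Spec_group_token_names token_names (group_token_names token_names)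

-- ===== LEMMAS AND PROOFS =====

-- the grouping fold reads back as a filter
theorem getD_groupfold (l : List String) (d : PySem.Dict String (List String)) (c : String) :
    (l.foldl (fun d name => d.modify (token_group_key name) [] (· ++ [name])) d).getD c []
      = d.getD c [] ++ l.filter (fun n => token_group_key n == c) := by
  induction l generalizing d with
  | nil => simp
  | cons x xs ih =>
    simp only [List.foldl_cons, List.filter_cons, ih]
    by_cases h : token_group_key x = c
    · simp [h]
    · have : (token_group_key x == c) = false := by simp [h]
      simp [this, PySem.Dict.getD_modify, Ne.symm h]

-- filtering a sorted list is sorting the filtered list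
theorem filter_sorted_eq_sorted_filter (l : List String) (p : String → Bool) :
    (PySem.List.sorted l (fun x => x) false).filter p
      = PySem.List.sorted (l.filter p) (fun x => x) false := by
  refine List.Perm.eq_of_pairwise (le := (· ≤ ·)) (fun a b _ _ h1 h2 => le_antisymm h1 h2)
    ((PySem.List.sorted_pairwise l (fun x => x)).sublist List.filter_sublist)
    (PySem.List.sorted_pairwise (l.filter p) (fun x => x))
    (((PySem.List.sorted_perm l (fun x => x) false).filter p).trans
      (PySem.List.sorted_perm (l.filter p) (fun x => x) false).symm)

-- where insertion puts x, as seen by a filter on its key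
theorem filter_insertBy (key : String → String) (k : String) (x : String) (acc : List String)
    (h : acc.Pairwise (fun a b => key a ≤ key b)) :
    (PySem.List.insertBy (fun a b => decide (key a < key b)) x acc).filter
        (fun a => key a == k)
      = acc.filter (fun a => key a == k) ++ (if key x == k then [x] else []) := by
  induction acc with
  | nil =>
    simp only [PySem.List.insertBy, List.filter_nil, List.nil_append]
    by_cases hxk : (key x == k) = true <;> simp [List.filter, hxk]
  | cons y ys ih =>
    rw [List.pairwise_cons] at h
    by_cases hb : (decide (key x < key y)) = true
    · simp only [PySem.List.insertBy, if_pos hb]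
      simp only [decide_eq_true_eq] at hb
      by_cases hxk : (key x == k) = true
      · have hkx : key x = k := beq_iff_eq.mp hxk
        have he : (y :: ys).filter (fun a => key a == k) = [] := by
          rw [List.filter_eq_nil_iff]
          intro a ha
          have hgt : key x < key a := by
            rcases List.mem_cons.mp ha with rfl | ha
            · exact hb
            · exact lt_of_lt_of_le hb (h.1 a ha)
          simp only [beq_iff_eq]
          intro hak
          rw [hak, ← hkx] at hgt
          exact lt_irrefl _ hgt
        rw [List.filter_cons_of_pos (p := fun a => key a == k) (a := x) (l := y :: ys) hxk, he, if_pos hxk]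
        simp
      · rw [List.filter_cons_of_neg (p := fun a => key a == k) (a := x) (l := y :: ys) hxk, if_neg hxk, List.append_nil]
    · simp only [PySem.List.insertBy, if_neg hb]
      rw [List.filter_cons, List.filter_cons, ih h.2]
      split_ifs <;> simp

-- the whole insertion-sort fold, seen by a filter on one key
theorem filter_foldl_insertBy (key : String → String) (k : String) (xs acc : List String)
    (h : acc.Pairwise (fun a b => key a ≤ key b)) :
    (xs.foldl (fun acc x =>
        PySem.List.insertBy (fun a b => decide (key a < key b)) x acc) acc).filter
        (fun a => key a == k)
      = acc.filter (fun a => key a == k) ++ xs.filter (fun a => key a == k) := by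
  induction xs generalizing acc with
  | nil => simp
  | cons x xs ih =>
    rw [List.foldl_cons, ih _ (PySem.List.insertBy_pairwise_le key x acc h),
      filter_insertBy key k x acc h, List.filter_cons, List.append_assoc]
    split_ifs with hx <;> simp

-- STABILITY: sorting by key does not reorder the elements of any one key class
theorem filter_key_sorted (xs : List String) (key : String → String) (k : String) :
    (PySem.List.sorted xs key false).filter (fun a => key a == k)
      = xs.filter (fun a => key a == k) := by
  rw [PySem.List.sorted_eq_foldl_insertBy]
  simpa using filter_foldl_insertBy key k xs [] (by simp)

-- the distinct elements of a ≤-ordered list are <-ordered, in order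
theorem ofList_pairwise_lt (S : List String) (h : S.Pairwise (fun a b => a ≤ b)) :
    (PySem.Set.ofList S).Pairwise (fun a b => a < b) := by
  induction S with
  | nil => simp [PySem.Set.ofList_nil]
  | cons x xs ih =>
    rw [List.pairwise_cons] at h
    rw [PySem.Set.ofList_cons]
    refine List.pairwise_cons.mpr ⟨fun z hz => ?_, ?_⟩
    · rcases (PySem.Set.mem_discard _ _ _).mp hz with ⟨hz1, hz2⟩
      exact lt_of_le_of_ne (h.1 z ((PySem.Set.mem_ofList _ _).mp hz1)) (Ne.symm hz2)
    · have := ih h.2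
      simp only [PySem.Set.discard]
      exact this.filter _

-- ofList respects permutation
theorem ofList_perm_of_perm (xs ys : List String) (h : xs.Perm ys) :
    (PySem.Set.ofList xs).Perm (PySem.Set.ofList ys) := by
  rw [List.perm_ext_iff_of_nodup (PySem.Set.nodup_ofList _) (PySem.Set.nodup_ofList _)]
  intro a
  simp only [PySem.Set.mem_ofList]
  exact h.mem_iff

-- the canonical value both ports compute
theorem ports_eq (token_names : List String) :
    group_token_names token_names = group_token_names_alt token_names := by
  unfold group_token_names group_token_names_alt
  simp only []
  set key := token_group_key with hkey
  set f : String → String × List String :=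
    fun k => (k, PySem.List.sorted (token_names.filter (fun n => key n == k)) (fun x => x) false) with hf
  set L := PySem.List.sorted (PySem.List.sorted token_names (fun x => x) false) key false with hL
  -- ===== A's side =====
  have hnodA : (token_names.foldl (fun d name => d.modify (key name) [] (· ++ [name]))
      PySem.Dict.empty).keys.Nodup :=
    PySem.Dict.nodup_keys_foldl_modify_key token_names key [] (fun _ x => (· ++ [x]))
      PySem.Dict.empty (by simp)
  have hkeysA : (token_names.foldl (fun d name => d.modify (key name) [] (· ++ [name]))
      PySem.Dict.empty).keys = PySem.Set.ofList (token_names.map key) := by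
    rw [PySem.Dict.keys_foldl_modify_key token_names key [] (fun _ x => (· ++ [x])) PySem.Dict.empty]
    simp [PySem.Set.update_nil_left, PySem.Dict.keys_empty]
  have hitemsA :
      ((token_names.foldl (fun d name => d.modify (key name) [] (· ++ [name]))
        PySem.Dict.empty).items.map (fun p => (p.1, PySem.List.sorted p.2 (fun x => x) false)))
      = (PySem.Set.ofList (token_names.map key)).map f := by
    rw [PySem.Dict.items_eq_map_keys _ hnodA []]
    rw [hkeysA, List.map_map]
    refine List.map_congr_left (fun k _ => ?_)
    simp only [Function.comp, hf]
    rw [getD_groupfold]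
    simp [← hkey]
  have hC : PySem.List.sorted
      ((token_names.foldl (fun d name => d.modify (key name) [] (· ++ [name]))
        PySem.Dict.empty).items.map (fun p => (p.1, PySem.List.sorted p.2 (fun x => x) false)))
      (fun kv => kv.1) false
      = (PySem.List.sorted (PySem.Set.ofList (token_names.map key)) (fun x => x) false).map f := by
    apply PySem.List.sorted_eq_of_perm_of_pairwise_lt
    · rw [hitemsA]
      exact ((PySem.List.sorted_perm (PySem.Set.ofList (token_names.map key))
        (fun x => x) false).map f)
    · have := PySem.List.sorted_ofList_pairwise_lt (token_names.map key)
      exact List.Pairwise.map f (by intro a b h; simpa [hf] using h) this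
  rw [hC]
  -- ===== B's side =====
  have hnodB : (L.foldl (fun d n => d.modify (key n) [] (· ++ [n]))
      PySem.Dict.empty).keys.Nodup :=
    PySem.Dict.nodup_keys_foldl_modify_key L key [] (fun _ x => (· ++ [x]))
      PySem.Dict.empty (by simp)
  have hkeysB : (L.foldl (fun d n => d.modify (key n) [] (· ++ [n]))
      PySem.Dict.empty).keys = PySem.Set.ofList (L.map key) := by
    rw [PySem.Dict.keys_foldl_modify_key L key [] (fun _ x => (· ++ [x])) PySem.Dict.empty]
    simp [PySem.Set.update_nil_left, PySem.Dict.keys_empty]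
  -- the keys come out already in sorted order
  have hLperm : L.Perm token_names := by
    exact (PySem.List.sorted_perm _ key false).trans
      (PySem.List.sorted_perm token_names (fun x => x) false)
  have hkeyOrder : PySem.List.sorted (PySem.Set.ofList (token_names.map key)) (fun x => x) false
      = PySem.Set.ofList (L.map key) := by
    apply PySem.List.sorted_eq_of_perm_of_pairwise_lt
    · exact ofList_perm_of_perm _ _ (hLperm.map key)
    · exact ofList_pairwise_lt _
        (List.pairwise_map.mpr (PySem.List.sorted_pairwise _ key))
  -- each group comes out already in sorted order (stability + filter/sort exchange)
  have hgroup : ∀ k, L.filter (fun n => key n == k)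
      = PySem.List.sorted (token_names.filter (fun n => key n == k)) (fun x => x) false := by
    intro k
    rw [hL, filter_key_sorted, filter_sorted_eq_sorted_filter]
  rw [hkeyOrder]
  rw [PySem.Dict.items_eq_map_keys _ hnodB [], hkeysB]
  refine List.map_congr_left (fun k hk => ?_)
  rw [getD_groupfold, hgroup k]
  simp [hf, PySem.Dict.getD_empty]

-- ===== VERDICT (by name: the statement is the Claim_ definition above) =====
theorem group_token_names_spec : Claim_equal_group_token_names := by
  intro token_names _
  unfold Spec_group_token_names
  exact ports_eq token_names
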